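-- pv_equiv track=rewrite | github.com/iran95cere/observer-patch-holography | wolfram_physics/code/ruliad_toy_benchmark.py | enumerate_histories
-- ===== SOURCE A (Python) =====
-- from collections import defaultdict
-- from typing import DefaultDict, Iterable
--
-- Edge = tuple[str, str]
--
-- History = tuple[str, ...]
--
-- INITIAL_STATE = "E"
--
-- MAX_DEPTH = 3
--
-- def enumerate_histories(rule_family: tuple[Edge, ...]) -> tuple[History, ...]:
--     """Enumerate all rooted histories from E of lengths 0..MAX_DEPTH.
--
--     The benchmark counts depend on including every prefix history, not only
--     maximal histories. That convention is explicit here to avoid accidental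
--     drift in later rewrites.
--     """
--
--     outgoing: DefaultDict[str, list[str]] = defaultdict(list)
--     for src, dst in rule_family:
--         outgoing[src].append(dst)
--
--     histories: list[History] = []
--
--     def walk(history: History) -> None:
--         histories.append(history)
--         depth = len(history) - 1
--         if depth == MAX_DEPTH:
--             return
--
--         current = history[-1]
--         for dst in outgoing.get(current, []):
--             walk(history + (dst,))
--
--     walk((INITIAL_STATE,))
--     return tuple(histories)
-- ===== SOURCE B (Python) =====
-- INITIAL_STATE = "E"
-- MAX_DEPTH = 3
--
--
-- def enumerate_histories(rule_family):
--     """Iterative DFS with an explicit stack instead of recursion (same pre-order)."""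
--     outgoing = {}
--     for src, dst in rule_family:
--         outgoing.setdefault(src, []).append(dst)
--
--     histories = []
--     stack = [(INITIAL_STATE,)]
--     while stack:
--         history = stack.pop()
--         histories.append(history)
--         if len(history) - 1 < MAX_DEPTH:
--             for dst in reversed(outgoing.get(history[-1], [])):
--                 stack.append(history + (dst,))
--     return tuple(histories)
-- ===== Notes on version B (the rewrite author's own statement) =====
-- stated objective: alternative
-- what changed: Replaces the recursive DFS closure mutating a shared histories list by an iterative DFS with an explicit stack: pop a history, record it, and push its children reversed so the LIFO stack reproduces the same pre-order.
import Mathlib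
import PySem

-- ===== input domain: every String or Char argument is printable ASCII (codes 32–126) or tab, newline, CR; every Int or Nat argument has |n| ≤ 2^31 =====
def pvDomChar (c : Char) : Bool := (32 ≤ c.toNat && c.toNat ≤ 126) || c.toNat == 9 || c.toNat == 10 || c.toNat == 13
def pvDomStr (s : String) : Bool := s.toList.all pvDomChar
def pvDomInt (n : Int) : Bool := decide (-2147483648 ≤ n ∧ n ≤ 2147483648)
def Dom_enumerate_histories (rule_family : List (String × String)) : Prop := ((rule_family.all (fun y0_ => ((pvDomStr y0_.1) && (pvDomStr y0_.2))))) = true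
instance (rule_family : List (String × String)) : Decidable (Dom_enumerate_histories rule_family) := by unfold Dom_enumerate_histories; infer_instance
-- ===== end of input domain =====

-- B replaces A's recursive DFS closure by an explicit-stack iterative DFS (children pushed
-- reversed, so the pre-order output is identical); objective: alternative decomposition.

-- ===== PORT A =====
-- A's recursive `walk`: record `history`, stop at depth MAX_DEPTH (= 3), else recurse on each
-- child of history[-1]; the shared `histories` list becomes the returned concatenation.
-- `fuel` is a Lean-only termination guard (= 3 - depth on every reachable call, so it never
-- cuts the computation: the depth check fires first); the `none` arm of history[-1] is dead
-- code (history is never empty).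
def pvWalkA (og : PySem.Dict String (List String)) : Nat → List String → List (List String)
  | fuel, history =>
    history ::
      (if (history.length : Int) - 1 = 3 then []
       else
         match fuel with
         | 0 => []
         | f + 1 =>
           match PySem.List.pyGet? history (-1) with
           | some current =>
               (og.getD current []).flatMap (fun dst => pvWalkA og f (history ++ [dst]))
           | none => [])

def enumerate_histories (rule_family : List (String × String)) : List (List String) :=
  -- for src, dst in rule_family: outgoing[src].append(dst)   (defaultdict(list))
  let outgoing := rule_family.foldl
    (fun d p => d.modify p.1 [] (fun l => l ++ [p.2])) PySem.Dict.empty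
  pvWalkA outgoing 3 ["E"]

-- ===== PORT B =====
-- B's while loop: pop the top history, record it, and if its depth is < 3 push each child
-- reversed (the foldl is the `for dst in reversed(...): stack.append(...)` loop).  `fuel` is a
-- Lean-only guard: each iteration pops one history, and at most n^3+n^2+n+1 histories exist.
def pvLoopB (og : PySem.Dict String (List String)) :
    Nat → List (List String) → List (List String) → List (List String)
  | _, [], acc => acc.reverse
  | 0, _ :: _, acc => acc.reverse
  | fuel + 1, history :: rest, acc =>
    let acc' := history :: acc
    if (history.length : Int) - 1 < 3 then
      match PySem.List.pyGet? history (-1) with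
      | some current =>
          pvLoopB og fuel
            (((og.getD current []).reverse).foldl (fun st dst => (history ++ [dst]) :: st) rest)
            acc'
      | none => pvLoopB og fuel rest acc'
    else pvLoopB og fuel rest acc'

def enumerate_histories_alt (rule_family : List (String × String)) : List (List String) :=
  -- outgoing.setdefault(src, []).append(dst)
  let outgoing := rule_family.foldl
    (fun d p => d.modify p.1 [] (fun l => l ++ [p.2])) PySem.Dict.empty
  let n := rule_family.length
  pvLoopB outgoing (n ^ 3 + n ^ 2 + n + 1) [["E"]] []

-- ===== PRECONDITION & SPEC =====
def Spec_enumerate_histories (rule_family : List (String × String)) (out : List (List String)) : Prop := out = enumerate_histories_alt rule_family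
instance (rule_family : List (String × String)) (out : List (List String)) : Decidable (Spec_enumerate_histories rule_family out) := by unfold Spec_enumerate_histories; infer_instance

-- ===== CLAIM (what is proved, stated in full; the proofs are below) =====
def Claim_equal_enumerate_histories : Prop := ∀ (rule_family : List (String × String)), Dom_enumerate_histories rule_family → Spec_enumerate_histories rule_family (enumerate_histories rule_family)

-- ===== LEMMAS AND PROOFS =====

-- the push loop over the reversed child list leaves the children on top in their original order
theorem pvFoldl_push (f : String → List String) :
    ∀ (l : List String) (st : List (List String)),
      l.foldl (fun st d => f d :: st) st = (l.map f).reverse ++ st := by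
  intro l
  induction l with
  | nil => intro st; simp
  | cons d l ih => intro st; simp [List.foldl_cons, ih]

-- every value list of the built dict has length at most the number of edges
theorem pvGetD_build_le :
    ∀ (rf : List (String × String)) (d : PySem.Dict String (List String)) (c : String),
      ((rf.foldl (fun d p => d.modify p.1 [] (fun l => l ++ [p.2])) d).getD c []).length
        ≤ (d.getD c []).length + rf.length := by
  intro rf
  induction rf with
  | nil => intro d c; simp
  | cons p rf ih =>
    intro d c
    simp only [List.foldl_cons, List.length_cons]
    have h := ih (d.modify p.1 [] (fun l => l ++ [p.2])) c
    have hstep : ((d.modify p.1 [] (fun l => l ++ [p.2])).getD c []).length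
        ≤ (d.getD c []).length + 1 := by
      rw [PySem.Dict.getD_modify]
      split_ifs with hc
      · subst hc; simp
      · omega
    omega

def pvBnd (n : Nat) : Nat → Nat
  | 0 => 1
  | f + 1 => 1 + n * pvBnd n f

theorem pvNumA_le (og : PySem.Dict String (List String)) (n : Nat)
    (hog : ∀ c, (og.getD c []).length ≤ n) :
    ∀ (fA : Nat) (h : List String), (pvWalkA og fA h).length ≤ pvBnd n fA := by
  intro fA
  induction fA with
  | zero =>
    intro h
    rw [pvWalkA]
    split <;> simp [pvBnd]
  | succ f ih =>
    intro h
    rw [pvWalkA]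
    split
    · simp [pvBnd]
    · cases hg : PySem.List.pyGet? h (-1) with
      | none => simp [pvBnd]
      | some current =>
        simp only [List.length_cons, pvBnd]
        have h1 : ∀ (l : List String),
            (l.flatMap (fun dst => pvWalkA og f (h ++ [dst]))).length
              ≤ l.length * pvBnd n f := by
          intro l
          induction l with
          | nil => simp
          | cons x l ihl =>
            have := ih (h ++ [x])
            simp only [List.flatMap_cons, List.length_append, List.length_cons]
            calc (pvWalkA og f (h ++ [x])).length +
                  (l.flatMap (fun dst => pvWalkA og f (h ++ [dst]))).length
                ≤ pvBnd n f + l.length * pvBnd n f := by omega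
              _ = (l.length + 1) * pvBnd n f := by ring
        have h2 := h1 (og.getD current [])
        have h3 := Nat.mul_le_mul_right (pvBnd n f) (hog current)
        omega

-- the central simulation: popping a history whose subtree A enumerates as `pvWalkA og fA h`
-- consumes exactly that many loop iterations and prepends the same histories (reversed) to acc
theorem pvMain (og : PySem.Dict String (List String)) :
    ∀ (fA : Nat) (h : List String) (rest acc : List (List String)) (fB : Nat),
      h.length + fA = 4 → fA ≤ 3 →
      pvLoopB og ((pvWalkA og fA h).length + fB) (h :: rest) acc
        = pvLoopB og fB rest ((pvWalkA og fA h).reverse ++ acc) := by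
  intro fA
  induction fA with
  | zero =>
    intro h rest acc fB hlen _
    have h4 : h.length = 4 := by omega
    have hw : pvWalkA og 0 h = [h] := by
      rw [pvWalkA]; simp [h4]
    rw [hw]
    have hfuel : ([h] : List (List String)).length + fB = fB + 1 := by simp; omega
    rw [hfuel, pvLoopB]
    have hng : ¬ ((h.length : Int) - 1 < 3) := by rw [h4]; norm_num
    simp [hng]
  | succ f ih =>
    intro h rest acc fB hlen hf3
    have hguard : ¬ ((h.length : Int) - 1 = 3) := by
      intro hc
      have : h.length = 4 := by omega
      omega
    have hguardB : (h.length : Int) - 1 < 3 := by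
      have : h.length ≤ 3 := by omega
      omega
    cases hg : PySem.List.pyGet? h (-1) with
    | none =>
      have hw : pvWalkA og (f + 1) h = [h] := by
        rw [pvWalkA]; simp only [if_neg hguard]; rw [hg]
      rw [hw]
      have hfuel : ([h] : List (List String)).length + fB = fB + 1 := by simp; omega
      rw [hfuel, pvLoopB]
      simp [hguardB, hg]
    | some current =>
      have hw : pvWalkA og (f + 1) h
          = h :: (og.getD current []).flatMap (fun dst => pvWalkA og f (h ++ [dst])) := by
        rw [pvWalkA]; simp only [if_neg hguard]; rw [hg]
      have aux : ∀ (cs : List String) (rest acc : List (List String)) (fB : Nat),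
          pvLoopB og ((cs.flatMap (fun dst => pvWalkA og f (h ++ [dst]))).length + fB)
              (cs.map (fun dst => h ++ [dst]) ++ rest) acc
            = pvLoopB og fB rest
              ((cs.flatMap (fun dst => pvWalkA og f (h ++ [dst]))).reverse ++ acc) := by
        intro cs
        induction cs with
        | nil => intro rest acc fB; simp
        | cons d cs ihc =>
          intro rest acc fB
          have hchild : (h ++ [d]).length + f = 4 := by
            simp only [List.length_append, List.length_cons, List.length_nil]
            omega
          have hstep := ih (h ++ [d]) (cs.map (fun dst => h ++ [dst]) ++ rest) acc
            ((cs.flatMap (fun dst => pvWalkA og f (h ++ [dst]))).length + fB)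
            hchild (by omega)
          simp only [List.flatMap_cons, List.length_append, List.map_cons,
            List.cons_append, List.reverse_append]
          rw [Nat.add_assoc, hstep, ihc]
          simp
      rw [hw]
      have hfuel : (h :: (og.getD current []).flatMap
            (fun dst => pvWalkA og f (h ++ [dst]))).length + fB
          = (((og.getD current []).flatMap
            (fun dst => pvWalkA og f (h ++ [dst]))).length + fB) + 1 := by
        simp only [List.length_cons]; omega
      rw [hfuel, pvLoopB]
      simp only [if_pos hguardB, hg]
      rw [pvFoldl_push, List.map_reverse, List.reverse_reverse, aux]
      simp

-- ===== VERDICT (by name: the statement is the Claim_ definition above) =====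
theorem enumerate_histories_spec : Claim_equal_enumerate_histories := by
  intro rf _
  unfold Spec_enumerate_histories enumerate_histories enumerate_histories_alt
  simp only []
  generalize hog : rf.foldl (fun d p => d.modify p.1 [] (fun l => l ++ [p.2]))
      PySem.Dict.empty = og
  have hbound : ∀ c, (og.getD c []).length ≤ rf.length := by
    intro c
    have := pvGetD_build_le rf PySem.Dict.empty c
    rw [hog] at this
    simpa using this
  have hN : (pvWalkA og 3 ["E"]).length ≤ rf.length ^ 3 + rf.length ^ 2 + rf.length + 1 := by
    have h1 := pvNumA_le og rf.length hbound 3 ["E"]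
    have hb : pvBnd rf.length 3 = rf.length ^ 3 + rf.length ^ 2 + rf.length + 1 := by
      simp [pvBnd]; ring
    omega
  have hsplit : rf.length ^ 3 + rf.length ^ 2 + rf.length + 1
      = (pvWalkA og 3 ["E"]).length
        + (rf.length ^ 3 + rf.length ^ 2 + rf.length + 1 - (pvWalkA og 3 ["E"]).length) := by
    omega
  rw [hsplit, pvMain og 3 ["E"] [] [] _ (by simp) (by omega), pvLoopB]
  simp
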